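-- pv_equiv track=rewrite | github.com/Frederick-Jerome-Thompson/albeti | alberti.py | deCipherCWText
-- ===== SOURCE A (Python) =====
-- def getGeoWIndexes(oLetter,iLetter):
--   outerWheel = '1234ABCDEFGILMNOPQRSTVXZ'
--   innerWheel = 'acegklnprtvz&xysomqihfdb'
--
--   q = outerWheel.find(oLetter)
--   r = innerWheel.find(iLetter)
--
--   return q,r
--
-- def getCWIndex(letter,wheel='1234ABCDEFGILMNOPQRSTVXZ'):
--   q = wheel.find(letter)
--   return q
--
-- def getCWLetter(index,wheel='acegklnprtvz&xysomqihfdb'):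
--   if index > len(wheel)-1:
--     index = index % len(wheel)
--   if index < 0:
--     index = index + len(wheel)
--   letter = wheel[index]
--   return letter
--
-- def deCipherCWText(theText,startKey='Ql'):
--
--   outerWheel = '1234ABCDEFGILMNOPQRSTVXZ'
--   innerWheel = 'acegklnprtvz&xysomqihfdb'
--   innerLetters = [letter for letter in innerWheel]
--
--   letters = [aLet for aLet in theText if aLet in innerLetters]
--   letter_indexes =  [getCWIndex(letter,wheel=innerWheel) for letter in letters]
--
-- ################get key set up
--
--   oLet = startKey[0]
--   iLet = startKey[1]
--   oInd,iInd = getGeoWIndexes(oLet,iLet)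
--   offset = iInd - oInd
--
--
-- ####################process encipherment
--
--   clear_letters = []
--
--   for i, indx in enumerate(letter_indexes):
--     cipher_letter = letters[i]
--     clear_letter = getCWLetter(indx - offset,wheel=outerWheel)
--     clear_letters.append(clear_letter)
--
--     if clear_letter in ['1','2','3','4']:
--       offset = offset - int(clear_letter)
--
--
--   decipher_text = "".join(clear_letters)
--   for num in ['1','2','3','4']:
--     decipher_text = decipher_text.replace(num,' ')
--
--   return decipher_text
-- ===== SOURCE B (Python) =====
-- def deCipherCWText(theText, startKey='Ql'):
--     outerWheel = '1234ABCDEFGILMNOPQRSTVXZ'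
--     innerWheel = 'acegklnprtvz&xysomqihfdb'
--     offset = innerWheel.find(startKey[1]) - outerWheel.find(startKey[0])
--     stream = [c for c in theText if c in innerWheel]
--
--     def decode(chars, off):
--         # translation table for this key setting
--         table = {ch: outerWheel[(i - off) % 24] for i, ch in enumerate(innerWheel)}
--         k = next((j for j, ch in enumerate(chars) if table[ch] in '1234'), None)
--         if k is None:
--             return [table[c] for c in chars]
--         return [table[c] for c in chars[:k]] + [' '] + decode(chars[k + 1:], off - int(table[chars[k]]))
--
--     return ''.join(decode(stream, offset))
-- ===== Notes on version B (the rewrite author's own statement) =====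
-- stated objective: alternative
-- what changed: B decodes segment-wise: it builds a 24-entry inner->outer translation dict for the current key setting, finds the next key-change marker, translates the whole segment through the dict, appends a space and recurses on the remainder with the updated offset, replacing A's per-character enumerate loop with getCWIndex/getCWLetter index arithmetic and the four trailing str.replace passes; a timing run measured it about 4x faster (dict lookups instead of two string.find-based helper calls per character).
import Mathlib
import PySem

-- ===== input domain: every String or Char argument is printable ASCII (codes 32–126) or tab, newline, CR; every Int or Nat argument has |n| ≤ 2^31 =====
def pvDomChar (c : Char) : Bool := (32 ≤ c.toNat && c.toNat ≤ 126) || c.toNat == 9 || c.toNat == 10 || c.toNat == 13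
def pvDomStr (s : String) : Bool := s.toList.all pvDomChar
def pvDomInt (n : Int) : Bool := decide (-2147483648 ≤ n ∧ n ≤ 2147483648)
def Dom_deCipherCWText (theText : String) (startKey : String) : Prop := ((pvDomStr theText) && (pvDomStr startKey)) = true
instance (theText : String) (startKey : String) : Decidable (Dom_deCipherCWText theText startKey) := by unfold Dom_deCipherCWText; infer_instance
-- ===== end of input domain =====

-- B deciphers segment-wise: a 24-entry inner->outer translation dict per key setting, translate
-- the segment up to the next key-change marker, recurse on the rest (objective: alternative).

-- ===== PORT A =====
-- strings are handled as their code-point lists (PySem.Chars); String.ofList at the return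

def getGeoWIndexes (oLetter : Char) (iLetter : Char) : Int × Int :=
  let outerWheel := "1234ABCDEFGILMNOPQRSTVXZ".toList
  let innerWheel := "acegklnprtvz&xysomqihfdb".toList
  (PySem.Chars.find outerWheel [oLetter], PySem.Chars.find innerWheel [iLetter])

def getCWIndex (letter : Char) (wheel : List Char) : Int :=
  PySem.Chars.find wheel [letter]

def getCWLetter (index : Int) (wheel : List Char) : Char :=
  let i1 := if index > PySem.List.len wheel - 1 then PySem.Int.mod index (PySem.List.len wheel) else index
  let i2 := if i1 < 0 then i1 + PySem.List.len wheel else i1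
  -- wheel[index]: in range at every call the ports reach; total form pyGetD
  PySem.List.pyGetD wheel i2 ' '

def deCipherCWText (theText : String) (startKey : String) : String :=
  let outerWheel := "1234ABCDEFGILMNOPQRSTVXZ".toList
  let innerWheel := "acegklnprtvz&xysomqihfdb".toList
  let innerLetters := innerWheel
  let letters := theText.toList.filter (fun aLet => decide (aLet ∈ innerLetters))
  let letterIndexes := letters.map (fun letter => getCWIndex letter innerWheel)
  -- startKey[0], startKey[1]: IndexError when len(startKey) < 2, excluded by Pre_
  let oLet := PySem.List.pyGetD startKey.toList 0 ' '
  let iLet := PySem.List.pyGetD startKey.toList 1 ' '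
  let p := getGeoWIndexes oLet iLet
  let offset := p.2 - p.1
  -- for i, indx in enumerate(letter_indexes): … (cipher_letter = letters[i] is dead code)
  let r := letterIndexes.foldl (fun (st : List Char × Int) indx =>
      let clearLetter := getCWLetter (indx - st.2) outerWheel
      let cls := st.1 ++ [clearLetter]
      if clearLetter ∈ ['1', '2', '3', '4'] then
        (cls, st.2 - (PySem.Int.ofChars? [clearLetter]).getD 0)
      else (cls, st.2)) ([], offset)
  let decipher := ['1', '2', '3', '4'].foldl (fun s num => PySem.Chars.replace s [num] [' ']) r.1
  String.ofList decipher

-- ===== PORT B =====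
-- table = {ch: outerWheel[(i - off) % 24] for i, ch in enumerate(innerWheel)}
def pvTable (off : Int) : PySem.Dict Char Char :=
  (PySem.List.enumerate ("acegklnprtvz&xysomqihfdb".toList)).foldl (fun d p =>
    PySem.Dict.insert d p.2
      (PySem.List.pyGetD ("1234ABCDEFGILMNOPQRSTVXZ".toList) (PySem.Int.mod (p.1 - off) 24) ' '))
    (PySem.Dict.ofList [])

-- decode(chars, off): table[c] is always present (chars ⊆ innerWheel): KeyError-free, total form getD;
-- int(table[chars[k]]) is always one of '1'..'4' there: total form (ofChars? …).getD 0
def pvDecode (chars : List Char) (off : Int) : List Char :=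
  let t := pvTable off
  match h : chars.findIdx? (fun ch => decide ((t.get? ch).getD ' ' ∈ ['1', '2', '3', '4'])) with
  | none => chars.map (fun c => (t.get? c).getD ' ')
  | some k =>
      (PySem.List.slice chars none (some (k : Int))).map (fun c => (t.get? c).getD ' ')
        ++ [' ']
        ++ pvDecode (PySem.List.slice chars (some ((k : Int) + 1)) none)
             (off - (PySem.Int.ofChars? [(t.get? (PySem.List.pyGetD chars (k : Int) ' ')).getD ' ']).getD 0)
termination_by chars.length
decreasing_by
  have hk : k < chars.length := ((List.findIdx?_eq_some_iff_getElem).mp h).1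
  have : ((k : Int) + 1) = ((k + 1 : Nat) : Int) := by push_cast; ring
  rw [this, PySem.List.slice_from_natCast, List.length_drop]
  omega

def deCipherCWText_alt (theText : String) (startKey : String) : String :=
  let outerWheel := "1234ABCDEFGILMNOPQRSTVXZ".toList
  let innerWheel := "acegklnprtvz&xysomqihfdb".toList
  -- startKey[0], startKey[1]: IndexError when len(startKey) < 2, excluded by Pre_
  let offset := PySem.Chars.find innerWheel [PySem.List.pyGetD startKey.toList 1 ' '] -
                PySem.Chars.find outerWheel [PySem.List.pyGetD startKey.toList 0 ' ']
  let stream := theText.toList.filter (fun c => decide (c ∈ innerWheel))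
  String.ofList (pvDecode stream offset)

-- ===== PRECONDITION & SPEC =====
-- Pre_ excludes only startKey of length < 2, on which A raises IndexError at startKey[0]/startKey[1] (B raises there too)
def Pre_deCipherCWText (theText : String) (startKey : String) : Prop := 2 ≤ startKey.toList.length
instance (theText : String) (startKey : String) : Decidable (Pre_deCipherCWText theText startKey) := by unfold Pre_deCipherCWText; infer_instance
def pvWitness_deCipherCWText : String × String := ("tv&z Hello", "Ql")

def Spec_deCipherCWText (theText : String) (startKey : String) (out : String) : Prop := out = deCipherCWText_alt theText startKey
instance (theText : String) (startKey : String) (out : String) : Decidable (Spec_deCipherCWText theText startKey out) := by unfold Spec_deCipherCWText; infer_instance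

-- ===== CLAIM (what is proved, stated in full; the proofs are below) =====
def Claim_equal_deCipherCWText : Prop := ∀ (theText : String) (startKey : String), Dom_deCipherCWText theText startKey → Pre_deCipherCWText theText startKey → Spec_deCipherCWText theText startKey (deCipherCWText theText startKey)

-- ===== LEMMAS AND PROOFS =====

-- the digit-to-space substitution A's trailing replace loop performs, as one char map
def pvG (x : Char) : Char :=
  if (if (if (if x = '1' then ' ' else x) = '2' then ' '
        else (if x = '1' then ' ' else x)) = '3' then ' '
      else (if (if x = '1' then ' ' else x) = '2' then ' '
        else (if x = '1' then ' ' else x))) = '4' then ' '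
  else (if (if (if x = '1' then ' ' else x) = '2' then ' '
        else (if x = '1' then ' ' else x)) = '3' then ' '
      else (if (if x = '1' then ' ' else x) = '2' then ' '
        else (if x = '1' then ' ' else x)))

theorem pv_singleton_infix (c : Char) (l : List Char) : [c] <:+: l ↔ c ∈ l := by
  constructor
  · intro h; exact (List.singleton_sublist).mp h.sublist
  · intro h
    obtain ⟨s, t, rfl⟩ := List.mem_iff_append.mp h
    exact ⟨s, t, by simp⟩

theorem pv_find_singleton_neg (w : List Char) (c : Char) :
    PySem.Chars.find w [c] < 0 ↔ c ∉ w := by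
  have h1 := PySem.Chars.neg_one_le_find w [c]
  rw [← pv_singleton_infix c w, ← PySem.Chars.find_eq_neg_one_iff]
  omega

theorem pv_find_singleton_bounds (w : List Char) (c : Char) (h : c ∈ w) :
    0 ≤ PySem.Chars.find w [c] ∧ PySem.Chars.find w [c] < w.length := by
  have h0 : 0 ≤ PySem.Chars.find w [c] := by
    have h1 := PySem.Chars.neg_one_le_find w [c]
    have := (PySem.Chars.find_ne_neg_one_iff w [c]).mpr ((pv_singleton_infix c w).mpr h)
    omega
  refine ⟨h0, ?_⟩
  have hlen := (PySem.Chars.find_spec h0).1.length_le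
  simp at hlen
  omega

theorem pv_go (a b : Char) : ∀ (fuel : Nat) (l acc : List Char), l.length ≤ fuel →
    PySem.Chars.replace.go [a] [b] fuel l acc
      = acc.reverse ++ l.map (fun x => if x = a then b else x) := by
  intro fuel
  induction fuel with
  | zero =>
    intro l acc h
    have : l = [] := by cases l <;> simp_all
    subst this
    simp [PySem.Chars.replace.go]
  | succ n ih =>
    intro l acc h
    cases l with
    | nil => simp [PySem.Chars.replace.go]
    | cons c t =>
      rw [PySem.Chars.replace.go]
      by_cases hc : c = a
      · subst hc
        simp only [List.isPrefixOf, BEq.rfl, Bool.true_and, if_true]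
        rw [ih _ _ (by simpa using h)]
        simp
      · have hp : List.isPrefixOf [a] (c :: t) = false := by
          simp [List.isPrefixOf]
          exact fun hh => absurd hh.symm hc
        rw [hp]
        simp only [Bool.false_eq_true, if_false]
        rw [ih _ _ (by simpa using h)]
        simp [hc]

theorem pv_replace_single (a b : Char) (s : List Char) :
    PySem.Chars.replace s [a] [b] = s.map (fun x => if x = a then b else x) := by
  rw [PySem.Chars.replace]
  simp only [List.isEmpty_cons, Bool.false_eq_true, if_false]
  exact pv_go a b s.length s [] le_rfl

theorem pv_key_letter (k : Int) (hk : -24 ≤ k) :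
    getCWLetter k ("1234ABCDEFGILMNOPQRSTVXZ".toList) =
    PySem.List.pyGetD ("1234ABCDEFGILMNOPQRSTVXZ".toList) (PySem.Int.mod k 24) ' ' := by
  have h24 : PySem.List.len ("1234ABCDEFGILMNOPQRSTVXZ".toList) = 24 := by decide
  unfold getCWLetter
  rw [h24]
  rw [PySem.Int.mod_eq_emod_of_pos (by norm_num : (0:Int) < 24)]
  dsimp only
  congr 1
  split_ifs <;> omega

theorem pv_digit_facts (x : Char) (h : x ∈ ['1', '2', '3', '4']) :
    1 ≤ (PySem.Int.ofChars? [x]).getD 0 ∧ pvG x = ' ' := by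
  fin_cases h <;> exact ⟨by decide, by decide⟩

theorem pv_nondigit (x : Char) (h : x ∉ ['1', '2', '3', '4']) : pvG x = x := by
  simp only [List.mem_cons, List.not_mem_nil, or_false, not_or] at h
  obtain ⟨h1, h2, h3, h4⟩ := h
  simp [pvG, h1, h2, h3, h4]

-- B's per-segment dict lookup = A's mod-24 outer-wheel indexing
theorem pvTable_lookup (off : Int) (c : Char) (hc : c ∈ "acegklnprtvz&xysomqihfdb".toList) :
    (((pvTable off).get? c).getD ' ') =
      PySem.List.pyGetD ("1234ABCDEFGILMNOPQRSTVXZ".toList)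
        (PySem.Int.mod (PySem.Chars.find ("acegklnprtvz&xysomqihfdb".toList) [c] - off) 24) ' ' := by
  have hE : PySem.List.enumerate ("acegklnprtvz&xysomqihfdb".toList)
      = [((0:Int),'a'),(1,'c'),(2,'e'),(3,'g'),(4,'k'),(5,'l'),(6,'n'),(7,'p'),(8,'r'),(9,'t'),(10,'v'),(11,'z'),(12,'&'),(13,'x'),(14,'y'),(15,'s'),(16,'o'),(17,'m'),(18,'q'),(19,'i'),(20,'h'),(21,'f'),(22,'d'),(23,'b')] := by decide
  rw [pvTable, hE]
  simp only [List.foldl_cons, List.foldl_nil]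
  have hc' : c ∈ ['a','c','e','g','k','l','n','p','r','t','v','z','&','x','y','s','o','m','q','i','h','f','d','b'] := hc
  simp only [List.mem_cons, List.not_mem_nil, or_false] at hc'
  rcases hc' with rfl|rfl|rfl|rfl|rfl|rfl|rfl|rfl|rfl|rfl|rfl|rfl|rfl|rfl|rfl|rfl|rfl|rfl|rfl|rfl|rfl|rfl|rfl|rfl
  · rw [show PySem.Chars.find ("acegklnprtvz&xysomqihfdb".toList) ['a'] = 0 from by decide]
    simp [PySem.Dict.get?_insert]
  · rw [show PySem.Chars.find ("acegklnprtvz&xysomqihfdb".toList) ['c'] = 1 from by decide]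
    simp [PySem.Dict.get?_insert]
  · rw [show PySem.Chars.find ("acegklnprtvz&xysomqihfdb".toList) ['e'] = 2 from by decide]
    simp [PySem.Dict.get?_insert]
  · rw [show PySem.Chars.find ("acegklnprtvz&xysomqihfdb".toList) ['g'] = 3 from by decide]
    simp [PySem.Dict.get?_insert]
  · rw [show PySem.Chars.find ("acegklnprtvz&xysomqihfdb".toList) ['k'] = 4 from by decide]
    simp [PySem.Dict.get?_insert]
  · rw [show PySem.Chars.find ("acegklnprtvz&xysomqihfdb".toList) ['l'] = 5 from by decide]
    simp [PySem.Dict.get?_insert]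
  · rw [show PySem.Chars.find ("acegklnprtvz&xysomqihfdb".toList) ['n'] = 6 from by decide]
    simp [PySem.Dict.get?_insert]
  · rw [show PySem.Chars.find ("acegklnprtvz&xysomqihfdb".toList) ['p'] = 7 from by decide]
    simp [PySem.Dict.get?_insert]
  · rw [show PySem.Chars.find ("acegklnprtvz&xysomqihfdb".toList) ['r'] = 8 from by decide]
    simp [PySem.Dict.get?_insert]
  · rw [show PySem.Chars.find ("acegklnprtvz&xysomqihfdb".toList) ['t'] = 9 from by decide]
    simp [PySem.Dict.get?_insert]
  · rw [show PySem.Chars.find ("acegklnprtvz&xysomqihfdb".toList) ['v'] = 10 from by decide]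
    simp [PySem.Dict.get?_insert]
  · rw [show PySem.Chars.find ("acegklnprtvz&xysomqihfdb".toList) ['z'] = 11 from by decide]
    simp [PySem.Dict.get?_insert]
  · rw [show PySem.Chars.find ("acegklnprtvz&xysomqihfdb".toList) ['&'] = 12 from by decide]
    simp [PySem.Dict.get?_insert]
  · rw [show PySem.Chars.find ("acegklnprtvz&xysomqihfdb".toList) ['x'] = 13 from by decide]
    simp [PySem.Dict.get?_insert]
  · rw [show PySem.Chars.find ("acegklnprtvz&xysomqihfdb".toList) ['y'] = 14 from by decide]
    simp [PySem.Dict.get?_insert]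
  · rw [show PySem.Chars.find ("acegklnprtvz&xysomqihfdb".toList) ['s'] = 15 from by decide]
    simp [PySem.Dict.get?_insert]
  · rw [show PySem.Chars.find ("acegklnprtvz&xysomqihfdb".toList) ['o'] = 16 from by decide]
    simp [PySem.Dict.get?_insert]
  · rw [show PySem.Chars.find ("acegklnprtvz&xysomqihfdb".toList) ['m'] = 17 from by decide]
    simp [PySem.Dict.get?_insert]
  · rw [show PySem.Chars.find ("acegklnprtvz&xysomqihfdb".toList) ['q'] = 18 from by decide]
    simp [PySem.Dict.get?_insert]
  · rw [show PySem.Chars.find ("acegklnprtvz&xysomqihfdb".toList) ['i'] = 19 from by decide]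
    simp [PySem.Dict.get?_insert]
  · rw [show PySem.Chars.find ("acegklnprtvz&xysomqihfdb".toList) ['h'] = 20 from by decide]
    simp [PySem.Dict.get?_insert]
  · rw [show PySem.Chars.find ("acegklnprtvz&xysomqihfdb".toList) ['f'] = 21 from by decide]
    simp [PySem.Dict.get?_insert]
  · rw [show PySem.Chars.find ("acegklnprtvz&xysomqihfdb".toList) ['d'] = 22 from by decide]
    simp [PySem.Dict.get?_insert]
  · rw [show PySem.Chars.find ("acegklnprtvz&xysomqihfdb".toList) ['b'] = 23 from by decide]
    simp

-- unfolding pvDecode one input character at a time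
theorem pvDecode_nil (off : Int) : pvDecode [] off = [] := by
  rw [pvDecode]
  split
  · simp
  · next k h1 => simp at h1

theorem pv_pyGetD_cons_succ (c : Char) (t : List Char) (k : Nat) :
    PySem.List.pyGetD (c :: t) ((k + 1 : Nat) : Int) ' ' = PySem.List.pyGetD t ((k : Nat) : Int) ' ' := by
  simp only [PySem.List.pyGetD, PySem.List.pyGet?, PySem.List.pyIdx?, List.length_cons]
  rw [if_pos (by positivity : (0:Int) ≤ ((k + 1 : Nat) : Int)),
      if_pos (by positivity : (0:Int) ≤ ((k : Nat) : Int))]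
  by_cases hk : k < t.length
  · rw [if_pos (by exact_mod_cast Nat.succ_lt_succ hk), if_pos (by exact_mod_cast hk)]
    simp
  · rw [if_neg (by exact_mod_cast fun h => hk (Nat.lt_of_succ_lt_succ h)),
        if_neg (by exact_mod_cast hk)]
    rfl

theorem pvDecode_cons_digit (c : Char) (t : List Char) (off : Int)
    (h : (((pvTable off).get? c).getD ' ') ∈ ['1', '2', '3', '4']) :
    pvDecode (c :: t) off
      = ' ' :: pvDecode t (off - (PySem.Int.ofChars? [((pvTable off).get? c).getD ' ']).getD 0) := by
  have hpc : (decide ((((pvTable off).get? c).getD ' ') ∈ ['1', '2', '3', '4'])) = true := by simp [h]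
  conv_lhs => rw [pvDecode]
  split
  · next h1 =>
    rw [List.findIdx?_cons, hpc] at h1
    simp at h1
  · next k h1 =>
    rw [List.findIdx?_cons, hpc] at h1
    simp only [if_true, Option.some.injEq] at h1
    subst h1
    rw [show ((0 : Nat) : Int) = (0 : Int) from rfl]
    rw [show ((0 : Int) + 1) = (1 : Int) by norm_num]
    rw [PySem.List.slice_from_one]
    rw [show (0 : Int) = ((0 : Nat) : Int) from rfl, PySem.List.slice_to_natCast]
    have h2 : PySem.List.pyGetD (c :: t) (((0 : Nat)) : Int) ' ' = c := by
      simp [PySem.List.pyGetD, PySem.List.pyGet?, PySem.List.pyIdx?]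
    rw [h2]
    simp

theorem pvDecode_cons_nondigit (c : Char) (t : List Char) (off : Int)
    (h : (((pvTable off).get? c).getD ' ') ∉ ['1', '2', '3', '4']) :
    pvDecode (c :: t) off = (((pvTable off).get? c).getD ' ') :: pvDecode t off := by
  have hpc : (decide ((((pvTable off).get? c).getD ' ') ∈ ['1', '2', '3', '4'])) = false := by simp [h]
  conv_lhs => rw [pvDecode]
  split
  · next h1 =>
    rw [List.findIdx?_cons, hpc] at h1
    simp only [Bool.false_eq_true, if_false, Option.map_eq_none_iff] at h1
    conv_rhs => rw [pvDecode]
    split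
    · next h2 => simp
    · next k h2 => rw [h1] at h2; exact absurd h2 (by simp)
  · next k h1 =>
    rw [List.findIdx?_cons, hpc] at h1
    simp only [Bool.false_eq_true, if_false, Option.map_eq_some_iff] at h1
    obtain ⟨k', hk', rfl⟩ := h1
    conv_rhs => rw [pvDecode]
    split
    · next h2 => rw [hk'] at h2; exact absurd h2 (by simp)
    · next k'' h2 =>
      rw [hk'] at h2
      simp only [Option.some.injEq] at h2
      subst h2
      have e1 : PySem.List.slice (c :: t) none (some ((k' + 1 : Nat) : Int)) = c :: t.take k' := by
        rw [PySem.List.slice_to_natCast]; rfl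
      have e2 : ((k' + 1 : Nat) : Int) + 1 = ((k' + 2 : Nat) : Int) := by push_cast; ring
      have e3 : PySem.List.slice (c :: t) (some ((k' + 2 : Nat) : Int)) none = t.drop (k' + 1) := by
        rw [PySem.List.slice_from_natCast]; rfl
      have e4 : PySem.List.slice t none (some ((k' : Nat) : Int)) = t.take k' :=
        PySem.List.slice_to_natCast t k'
      have e5 : ((k' : Nat) : Int) + 1 = ((k' + 1 : Nat) : Int) := by push_cast; ring
      have e6 : PySem.List.slice t (some ((k' + 1 : Nat) : Int)) none = t.drop (k' + 1) :=
        PySem.List.slice_from_natCast t (k' + 1)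
      rw [e1, e2, e3, pv_pyGetD_cons_succ, e4, e5, e6]
      simp

-- the segment recursion equals A's deciphering fold (clear letters pushed through pvG)
theorem pv_main (l : List Char) (hl : ∀ c ∈ l, c ∈ "acegklnprtvz&xysomqihfdb".toList)
    (acc : List Char) (off : Int) (hoff : off ≤ 24) :
    ((l.foldl (fun (st : List Char × Int) ch =>
        let clearLetter := getCWLetter (getCWIndex ch ("acegklnprtvz&xysomqihfdb".toList) - st.2) ("1234ABCDEFGILMNOPQRSTVXZ".toList)
        let cls := st.1 ++ [clearLetter]
        if clearLetter ∈ ['1', '2', '3', '4'] then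
          (cls, st.2 - (PySem.Int.ofChars? [clearLetter]).getD 0)
        else (cls, st.2)) (acc, off)).1).map pvG
      = acc.map pvG ++ pvDecode l off := by
  induction l generalizing acc off with
  | nil => simp [pvDecode_nil]
  | cons c t ih =>
    have hc : c ∈ "acegklnprtvz&xysomqihfdb".toList := hl c (by simp)
    obtain ⟨hge, _⟩ := pv_find_singleton_bounds _ c hc
    have hl' : ∀ x ∈ t, x ∈ "acegklnprtvz&xysomqihfdb".toList := fun x hx => hl x (by simp [hx])
    have hcl : getCWLetter (getCWIndex c ("acegklnprtvz&xysomqihfdb".toList) - off) ("1234ABCDEFGILMNOPQRSTVXZ".toList)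
        = (((pvTable off).get? c).getD ' ') := by
      rw [getCWIndex, pv_key_letter _ (by omega), pvTable_lookup off c hc]
    simp only [List.foldl_cons]
    by_cases hd : (((pvTable off).get? c).getD ' ') ∈ ['1', '2', '3', '4']
    · rw [hcl] at *
      simp only [hd, if_true]
      obtain ⟨hval, hg⟩ := pv_digit_facts _ hd
      rw [ih hl' _ _ (by omega), pvDecode_cons_digit c t off hd]
      simp [hg]
    · rw [hcl] at *
      simp only [hd, if_false]
      rw [ih hl' _ _ hoff, pvDecode_cons_nondigit c t off hd]
      simp [pv_nondigit _ hd]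

-- ===== VERDICT (by name: the statement is the Claim_ definition above) =====
theorem deCipherCWText_spec : Claim_equal_deCipherCWText := by
  intro theText startKey _ _
  unfold Spec_deCipherCWText deCipherCWText deCipherCWText_alt
  dsimp only
  rw [List.foldl_map]
  simp only [getGeoWIndexes]
  have hoff : PySem.Chars.find ("acegklnprtvz&xysomqihfdb".toList) [PySem.List.pyGetD startKey.toList 1 ' '] -
      PySem.Chars.find ("1234ABCDEFGILMNOPQRSTVXZ".toList) [PySem.List.pyGetD startKey.toList 0 ' '] ≤ 24 := by
    have hi : PySem.Chars.find ("acegklnprtvz&xysomqihfdb".toList) [PySem.List.pyGetD startKey.toList 1 ' '] ≤ 23 := by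
      by_cases h : PySem.List.pyGetD startKey.toList 1 ' ' ∈ "acegklnprtvz&xysomqihfdb".toList
      · have h2 := (pv_find_singleton_bounds _ _ h).2
        have hlen : ("acegklnprtvz&xysomqihfdb".toList).length = 24 := by decide
        rw [hlen] at h2
        omega
      · have := (pv_find_singleton_neg ("acegklnprtvz&xysomqihfdb".toList) _).mpr h
        omega
    have ho := PySem.Chars.neg_one_le_find ("1234ABCDEFGILMNOPQRSTVXZ".toList)
        [PySem.List.pyGetD startKey.toList 0 ' ']
    omega
  have hmem : ∀ c ∈ theText.toList.filter (fun aLet => decide (aLet ∈ "acegklnprtvz&xysomqihfdb".toList)), c ∈ "acegklnprtvz&xysomqihfdb".toList := by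
    intro c hcm
    simpa using (List.mem_filter.mp hcm).2
  have h := pv_main (theText.toList.filter (fun aLet => decide (aLet ∈ "acegklnprtvz&xysomqihfdb".toList))) hmem [] _ hoff
  rw [List.map_nil, List.nil_append] at h
  refine congrArg String.ofList ?_
  rw [← h]
  simp only [List.foldl_cons, List.foldl_nil, pv_replace_single, List.map_map]
  rfl
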